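-- pv_equiv track=rewrite | github.com/drizztSun/common_project | PythonLeetcode/Leetcode/1559_DetectCyclesIn2DGrid.py | doit_dfs
-- ===== SOURCE A (Python) =====
-- def doit_dfs(grid: list) -> bool:
--
--     seen = set()
--
--     def search(i, j, lasti, lastj):
--
--         seen.add((i, j))
--
--         for delta in [(1, 0), (-1, 0), (0, 1), (0, -1)]:
--             x, y = i + delta[0], j + delta[1]
--             if 0 <= x < len(grid) and 0 <= y < len(grid[0]) and grid[x][y] == grid[i][j] and (x, y) != (
--             lasti, lastj):
--                 if (x, y) in seen:
--                     return True
--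
--                 if search(x, y, i, j):
--                     return True
--
--         return False
--
--     for i in range(len(grid)):
--         for j in range(len(grid[0])):
--             if (i, j) not in seen and search(i, j, -1, -1):
--                 return True
--
--     return False
-- ===== SOURCE B (Python) =====
-- def doit_dfs(grid: list) -> bool:
--     # Iterative DFS: an explicit stack of resumable frames (cell, parent, remaining
--     # neighbor deltas) replaces A's recursive closure; same return value, no recursion.
--     if not grid or not grid[0]:
--         return False
--     rows, cols = len(grid), len(grid[0])
--     deltas = ((1, 0), (-1, 0), (0, 1), (0, -1))
--     seen = set()
--     for si in range(rows):
--         for sj in range(cols):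
--             if (si, sj) in seen:
--                 continue
--             seen.add((si, sj))
--             stack = [(si, sj, -1, -1, deltas)]
--             while stack:
--                 i, j, pi, pj, rem = stack.pop()
--                 while rem:
--                     dx, dy = rem[0]
--                     rem = rem[1:]
--                     x, y = i + dx, j + dy
--                     if 0 <= x < rows and 0 <= y < cols and grid[x][y] == grid[i][j] and (x, y) != (pi, pj):
--                         if (x, y) in seen:
--                             return True
--                         stack.append((i, j, pi, pj, rem))
--                         stack.append((x, y, i, j, deltas))
--                         seen.add((x, y))
--                         break
--     return False
-- ===== Notes on version B (the rewrite author's own statement) =====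
-- stated objective: alternative
-- what changed: A's recursive closure DFS (with Python call-stack recursion per cell) is replaced by an iterative DFS that drives an explicit stack of resumable (cell, parent, remaining-neighbor-deltas) frames, so B needs no recursion and cannot hit Python's recursion limit.
-- outside the precondition, e.g. on doit_dfs([['b', 'b', 'a'], ['b', 'b']]): A returns True, B returns True
import Mathlib
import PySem

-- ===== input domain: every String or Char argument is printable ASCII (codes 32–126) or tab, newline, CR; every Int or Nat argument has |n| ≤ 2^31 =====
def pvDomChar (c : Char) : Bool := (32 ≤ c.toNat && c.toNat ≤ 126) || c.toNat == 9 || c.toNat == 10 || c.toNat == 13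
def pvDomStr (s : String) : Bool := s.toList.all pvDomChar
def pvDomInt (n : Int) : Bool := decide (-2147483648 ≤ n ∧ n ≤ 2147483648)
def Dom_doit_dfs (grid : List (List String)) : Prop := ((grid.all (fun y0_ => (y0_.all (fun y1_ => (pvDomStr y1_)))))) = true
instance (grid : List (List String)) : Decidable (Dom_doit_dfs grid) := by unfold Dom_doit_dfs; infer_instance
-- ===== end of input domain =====

-- B replaces A's recursive-closure DFS by an iterative DFS over an explicit stack of
-- resumable (cell, parent, remaining-neighbor) frames: same return value (alternative
-- decomposition, no Python recursion).

-- ===== shared helpers (the identical neighbour-condition line of both Pythons) =====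
-- len(grid)
def pvR (grid : List (List String)) : Int := grid.length
-- len(grid[0]) (evaluated with a default; both Pythons only use it when grid ≠ [])
def pvC (grid : List (List String)) : Int := ((PySem.List.pyGet? grid 0).getD []).length
-- grid[x][y]; both Pythons evaluate it only after the bounds check, where it is exact
def pvCell (grid : List (List String)) (x y : Int) : String :=
  (PySem.List.pyGet? ((PySem.List.pyGet? grid x).getD []) y).getD ""
-- 0 <= x < len(grid) and 0 <= y < len(grid[0]) and grid[x][y] == grid[i][j] and (x,y) != (li,lj)
def pvCond (grid : List (List String)) (i j x y li lj : Int) : Bool :=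
  decide (0 ≤ x) && decide (x < pvR grid) && decide (0 ≤ y) && decide (y < pvC grid) &&
    (pvCell grid x y == pvCell grid i j) && !((x, y) == (li, lj))
def pvDeltas : List (Int × Int) := [(1, 0), (-1, 0), (0, 1), (0, -1)]

-- ===== PORT A =====
-- the recursive closure `search` (fuel only makes the recursion total; the proofs show
-- the initial fuel is never exhausted)
mutual
def searchA (grid : List (List String)) (fuel : Nat) (i j li lj : Int)
    (seen : PySem.Set (Int × Int)) : Bool × PySem.Set (Int × Int) :=
  match fuel with
  | 0 => (false, seen)
  | fuel + 1 => goA grid fuel pvDeltas i j li lj (PySem.Set.add seen (i, j))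
termination_by (fuel, 0, 0)

-- the `for delta in [...]` loop inside `search`
def goA (grid : List (List String)) (fuel : Nat) (ds : List (Int × Int)) (i j li lj : Int)
    (seen : PySem.Set (Int × Int)) : Bool × PySem.Set (Int × Int) :=
  match ds with
  | [] => (false, seen)
  | d :: ds' =>
    let x := i + d.1
    let y := j + d.2
    if pvCond grid i j x y li lj then
      if (x, y) ∈ seen then (true, seen)
      else
        match searchA grid fuel x y i j seen with
        | (true, s) => (true, s)
        | (false, s) => goA grid fuel ds' i j li lj s
    else goA grid fuel ds' i j li lj seen
termination_by (fuel, 1, ds.length)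
end

def pvFuelA (grid : List (List String)) : Nat :=
  grid.length * ((PySem.List.pyGet? grid 0).getD []).length + 1

-- the `for j in range(len(grid[0]))` loop
def innerA (grid : List (List String)) (i : Int) (js : List Int)
    (seen : PySem.Set (Int × Int)) : Bool × PySem.Set (Int × Int) :=
  match js with
  | [] => (false, seen)
  | j :: js' =>
    if (i, j) ∈ seen then innerA grid i js' seen
    else
      match searchA grid (pvFuelA grid) i j (-1) (-1) seen with
      | (true, s) => (true, s)
      | (false, s) => innerA grid i js' s

-- the `for i in range(len(grid))` loop
def outerA (grid : List (List String)) (is_ : List Int) (seen : PySem.Set (Int × Int)) : Bool :=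
  match is_ with
  | [] => false
  | i :: is' =>
    match innerA grid i (PySem.List.pyRange 0 (pvC grid) 1) seen with
    | (true, _) => true
    | (false, s) => outerA grid is' s

def doit_dfs (grid : List (List String)) : Bool :=
  outerA grid (PySem.List.pyRange 0 (pvR grid) 1) PySem.Set.empty

-- ===== PORT B =====
-- outcome of scanning the remaining deltas of the top frame (the inner `while rem` loop
-- up to its first push / return)
inductive PvStep where
  | cycle : PvStep
  | push : List (Int × Int) → Int → Int → PvStep
  | done : PvStep
deriving DecidableEq, Repr

def scanB (grid : List (List String)) (i j pi pj : Int) (rem : List (Int × Int))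
    (seen : PySem.Set (Int × Int)) : PvStep :=
  match rem with
  | [] => .done
  | d :: rem' =>
    let x := i + d.1
    let y := j + d.2
    if pvCond grid i j x y pi pj then
      if (x, y) ∈ seen then .cycle else .push rem' x y
    else scanB grid i j pi pj rem' seen

def pvFuelB (grid : List (List String)) : Nat :=
  6 * (grid.length * ((PySem.List.pyGet? grid 0).getD []).length) + 6

-- the `while stack` loop (fuel only makes the loop total; never exhausted from pvFuelB)
def runB (grid : List (List String)) (fuel : Nat)
    (stack : List (Int × Int × Int × Int × List (Int × Int)))
    (seen : PySem.Set (Int × Int)) : Bool × PySem.Set (Int × Int) :=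
  match fuel with
  | 0 => (false, seen)
  | fuel + 1 =>
    match stack with
    | [] => (false, seen)
    | (i, j, pi, pj, rem) :: rest =>
      match scanB grid i j pi pj rem seen with
      | .cycle => (true, seen)
      | .push rem' x y =>
        runB grid fuel ((x, y, i, j, pvDeltas) :: (i, j, pi, pj, rem') :: rest)
          (PySem.Set.add seen (x, y))
      | .done => runB grid fuel rest seen

-- the `for sj in range(cols)` loop
def innerB (grid : List (List String)) (si : Int) (js : List Int)
    (seen : PySem.Set (Int × Int)) : Bool × PySem.Set (Int × Int) :=
  match js with
  | [] => (false, seen)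
  | sj :: js' =>
    if (si, sj) ∈ seen then innerB grid si js' seen
    else
      match runB grid (pvFuelB grid) [(si, sj, -1, -1, pvDeltas)]
          (PySem.Set.add seen (si, sj)) with
      | (true, s) => (true, s)
      | (false, s) => innerB grid si js' s

-- the `for si in range(rows)` loop
def outerB (grid : List (List String)) (is_ : List Int) (seen : PySem.Set (Int × Int)) : Bool :=
  match is_ with
  | [] => false
  | si :: is' =>
    match innerB grid si (PySem.List.pyRange 0 (pvC grid) 1) seen with
    | (true, _) => true
    | (false, s) => outerB grid is' s

def doit_dfs_alt (grid : List (List String)) : Bool :=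
  if grid.length = 0 ∨ pvC grid = 0 then false
  else outerB grid (PySem.List.pyRange 0 (pvR grid) 1) PySem.Set.empty

-- ===== PRECONDITION & SPEC =====
-- Pre_ excludes ragged grids (a row shorter than row 0): there A's nominal-bounds
-- neighbour check indexes past the short row and raises IndexError unless a cycle is
-- found first, so A's value on the returning ones is an accident of traversal order.
def Pre_doit_dfs (grid : List (List String)) : Prop :=
  ∀ row ∈ grid, (grid.headD []).length ≤ row.length
instance (grid : List (List String)) : Decidable (Pre_doit_dfs grid) := by
  unfold Pre_doit_dfs; infer_instance

def pvWitness_doit_dfs : List (List String) := [["a", "a"], ["a", "a"]]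

def Spec_doit_dfs (grid : List (List String)) (out : Bool) : Prop := out = doit_dfs_alt grid
instance (grid : List (List String)) (out : Bool) : Decidable (Spec_doit_dfs grid out) := by
  unfold Spec_doit_dfs; infer_instance

-- ===== CLAIM (what is proved, stated in full; the proofs are below) =====
def Claim_equal_doit_dfs : Prop :=
  ∀ (grid : List (List String)), Dom_doit_dfs grid → Pre_doit_dfs grid →
    Spec_doit_dfs grid (doit_dfs grid)

-- ===== LEMMAS AND PROOFS =====

-- the in-bounds cells, and the count of not-yet-seen cells (termination potential)
def pvCells (grid : List (List String)) : List (Int × Int) :=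
  (List.range grid.length).flatMap fun (a : Nat) =>
    (List.range ((PySem.List.pyGet? grid 0).getD []).length).map fun (b : Nat) =>
      (Int.ofNat a, Int.ofNat b)

def pvMu (grid : List (List String)) (seen : PySem.Set (Int × Int)) : Nat :=
  ((pvCells grid).filter (fun p => !(decide (p ∈ seen)))).length

-- potential of a machine state of B
def pvM (grid : List (List String)) (stack : List (Int × Int × Int × Int × List (Int × Int)))
    (seen : PySem.Set (Int × Int)) : Nat :=
  (stack.map (fun fr => fr.2.2.2.2.length + 1)).sum + 6 * pvMu grid seen

lemma pv_mem_cells (grid : List (List String)) (p : Int × Int) :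
    p ∈ pvCells grid ↔ 0 ≤ p.1 ∧ p.1 < pvR grid ∧ 0 ≤ p.2 ∧ p.2 < pvC grid := by
  obtain ⟨u, v⟩ := p
  unfold pvR pvC
  constructor
  · intro h
    rcases List.mem_flatMap.mp h with ⟨a, ha, hm⟩
    rcases List.mem_map.mp hm with ⟨b, hb, heq⟩
    rw [List.mem_range] at ha hb
    rw [Prod.mk.injEq] at heq
    obtain ⟨h1, h2⟩ := heq
    simp only [Int.ofNat_eq_natCast] at h1 h2
    omega
  · rintro ⟨h1, h2, h3, h4⟩
    refine List.mem_flatMap.mpr ⟨u.toNat, List.mem_range.mpr (by simp at h2 ⊢; omega), ?_⟩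
    refine List.mem_map.mpr ⟨v.toNat, List.mem_range.mpr (by simp at h4 ⊢; omega), ?_⟩
    rw [Prod.mk.injEq]
    simp only [Int.ofNat_eq_natCast]
    omega

lemma pv_cond_cells (grid : List (List String)) {i j x y li lj : Int}
    (h : pvCond grid i j x y li lj = true) : (x, y) ∈ pvCells grid := by
  simp only [pvCond, Bool.and_eq_true, decide_eq_true_eq] at h
  rw [pv_mem_cells]
  exact ⟨h.1.1.1.1.1, h.1.1.1.1.2, h.1.1.1.2, h.1.1.2⟩

lemma pv_mu_le (grid : List (List String)) {s s' : PySem.Set (Int × Int)}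
    (h : ∀ q, q ∈ s → q ∈ s') : pvMu grid s' ≤ pvMu grid s := by
  simp only [pvMu, ← List.countP_eq_length_filter]
  refine List.countP_mono_left fun p _ hp => ?_
  simp only [Bool.not_eq_eq_eq_not, Bool.not_true, decide_eq_false_iff_not] at hp ⊢
  exact fun hs => hp (h p hs)

lemma pv_strict_countP {α : Type} (P Q : α → Bool) (hpq : ∀ x, P x = true → Q x = true)
    (p : α) (hP : P p = false) (hQ : Q p = true) :
    ∀ l : List α, p ∈ l → l.countP P < l.countP Q := by
  intro l hl
  induction l with
  | nil => cases hl
  | cons a l ih =>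
    rcases List.mem_cons.mp hl with rfl | hmem
    · rw [List.countP_cons, List.countP_cons, hP, hQ]
      simpa using Nat.lt_succ_of_le (List.countP_mono_left fun x _ => hpq x)
    · rw [List.countP_cons, List.countP_cons]
      have := ih hmem
      by_cases hpa : P a = true
      · simp [hpa, hpq a hpa]; omega
      · simp only [Bool.not_eq_true] at hpa
        simp [hpa]; split <;> omega

lemma pv_mu_add_lt (grid : List (List String)) {s : PySem.Set (Int × Int)} {p : Int × Int}
    (hc : p ∈ pvCells grid) (hn : p ∉ s) :
    pvMu grid (PySem.Set.add s p) < pvMu grid s := by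
  simp only [pvMu, ← List.countP_eq_length_filter]
  refine pv_strict_countP _ _ (fun x hx => ?_) p ?_ ?_ _ hc
  · simp only [Bool.not_eq_eq_eq_not, Bool.not_true, decide_eq_false_iff_not,
      PySem.Set.mem_add] at hx ⊢
    exact fun h => hx (Or.inl h)
  · simp [PySem.Set.mem_add]
  · simpa using hn

lemma pv_mu_le_total (grid : List (List String)) (s : PySem.Set (Int × Int)) :
    pvMu grid s ≤ grid.length * ((PySem.List.pyGet? grid 0).getD []).length := by
  calc pvMu grid s ≤ (pvCells grid).length := List.length_filter_le _ _
  _ ≤ _ := by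
      simp only [pvCells, List.length_flatMap, List.length_map, List.length_range]
      simp [List.map_const']

-- monotonicity: `search` only ever adds to `seen`
lemma pv_goA_mono (grid : List (List String)) :
    ∀ fuel ds i j li lj seen q, q ∈ seen → q ∈ (goA grid fuel ds i j li lj seen).2 := by
  intro fuel
  induction fuel using Nat.strong_induction_on with
  | _ fuel IH =>
    intro ds
    induction ds with
    | nil => intro i j li lj seen q hq; simpa [goA] using hq
    | cons d ds' ihds =>
      intro i j li lj seen q hq
      rw [goA]
      by_cases hc : pvCond grid i j (i + d.1) (j + d.2) li lj = true
      · simp only [hc, if_true]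
        by_cases hm : (i + d.1, j + d.2) ∈ seen
        · simp [hm, hq]
        · simp only [hm]
          rcases hs : searchA grid fuel (i + d.1) (j + d.2) i j seen with ⟨b, s⟩
          have hqs : q ∈ s := by
            cases fuel with
            | zero => rw [searchA] at hs; cases hs; exact hq
            | succ n =>
              rw [searchA] at hs
              have := IH n (Nat.lt_succ_self n) pvDeltas (i + d.1) (j + d.2) i j
                (PySem.Set.add seen (i + d.1, j + d.2)) q
                (by simp [PySem.Set.mem_add, hq])
              rw [hs] at this
              exact this
          cases b
          · simpa using ihds i j li lj s q hqs
          · simpa using hqs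
      · simp only [hc]
        exact ihds i j li lj seen q hq

lemma pv_searchA_mono (grid : List (List String)) (fuel : Nat) (i j li lj : Int)
    (seen : PySem.Set (Int × Int)) (q : Int × Int) (h : q ∈ seen) :
    q ∈ (searchA grid fuel i j li lj seen).2 := by
  cases fuel with
  | zero => simpa [searchA] using h
  | succ n =>
    rw [searchA]
    exact pv_goA_mono grid n pvDeltas i j li lj (PySem.Set.add seen (i, j)) q
      (by simp [PySem.Set.mem_add, h])

-- fuel irrelevance for A: any fuel above the unseen-cell count computes the real search
lemma pv_goA_fuel (grid : List (List String)) :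
    ∀ m f f' : Nat, m ≤ f → m ≤ f' → ∀ ds seen i j li lj, pvMu grid seen ≤ m →
      goA grid f ds i j li lj seen = goA grid f' ds i j li lj seen := by
  intro m
  induction m using Nat.strong_induction_on with
  | _ m IH =>
    intro f f' hf hf' ds
    induction ds with
    | nil => intro seen i j li lj _; simp [goA]
    | cons d ds' ihds =>
      intro seen i j li lj hmu
      rw [goA, goA]
      by_cases hc : pvCond grid i j (i + d.1) (j + d.2) li lj = true
      · simp only [hc, if_true]
        by_cases hm : (i + d.1, j + d.2) ∈ seen
        · simp [hm]
        · simp only [hm]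
          have hcell := pv_cond_cells grid hc
          have hpos : 0 < pvMu grid seen := by
            apply List.length_pos_of_mem (a := (i + d.1, j + d.2))
            exact List.mem_filter.mpr ⟨hcell, by simp [hm]⟩
          have hlt : pvMu grid (PySem.Set.add seen (i + d.1, j + d.2)) < pvMu grid seen :=
            pv_mu_add_lt grid hcell hm
          match m, f, f', hf, hf' with
          | mm + 1, fa + 1, fb + 1, hf, hf' =>
            have hsearch : searchA grid (fa + 1) (i + d.1) (j + d.2) i j seen =
                searchA grid (fb + 1) (i + d.1) (j + d.2) i j seen := by
              rw [searchA, searchA]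
              exact IH mm (Nat.lt_succ_self mm) fa fb (by omega) (by omega) pvDeltas
                (PySem.Set.add seen (i + d.1, j + d.2)) _ _ _ _ (by omega)
            rw [hsearch]
            rcases hs : searchA grid (fb + 1) (i + d.1) (j + d.2) i j seen with ⟨b, s⟩
            have hsub : ∀ q, q ∈ seen → q ∈ s := by
              intro q hq
              have := pv_searchA_mono grid (fb + 1) (i + d.1) (j + d.2) i j seen q hq
              rwa [hs] at this
            cases b
            · simpa using ihds s i j li lj (le_trans (pv_mu_le grid hsub) (by omega))
            · simp
          | 0, _, _, _, _ => omega
      · simp only [hc]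
        exact ihds seen i j li lj hmu

-- fuel irrelevance for B
-- scanB/goA correspondence on one frame
lemma pv_scan_done (grid : List (List String)) {i j pi pj : Int} {rem : List (Int × Int)}
    {seen : PySem.Set (Int × Int)} (h : scanB grid i j pi pj rem seen = .done) :
    ∀ f, goA grid f rem i j pi pj seen = (false, seen) := by
  induction rem with
  | nil => intro f; simp [goA]
  | cons d rem' ih =>
    intro f
    rw [scanB] at h
    rw [goA]
    by_cases hc : pvCond grid i j (i + d.1) (j + d.2) pi pj = true
    · simp only [hc, if_true] at h ⊢
      by_cases hm : (i + d.1, j + d.2) ∈ seen <;> simp [hm] at h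
    · simp only [hc] at h ⊢
      exact ih h f

lemma pv_scan_cycle (grid : List (List String)) {i j pi pj : Int} {rem : List (Int × Int)}
    {seen : PySem.Set (Int × Int)} (h : scanB grid i j pi pj rem seen = .cycle) :
    ∀ f, goA grid f rem i j pi pj seen = (true, seen) := by
  induction rem with
  | nil => intro f; simp [scanB] at h
  | cons d rem' ih =>
    intro f
    rw [scanB] at h
    rw [goA]
    by_cases hc : pvCond grid i j (i + d.1) (j + d.2) pi pj = true
    · simp only [hc, if_true] at h ⊢
      by_cases hm : (i + d.1, j + d.2) ∈ seen <;> simp [hm] at h ⊢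
    · simp only [hc] at h ⊢
      exact ih h f

lemma pv_scan_push (grid : List (List String)) {i j pi pj x y : Int}
    {rem rem' : List (Int × Int)} {seen : PySem.Set (Int × Int)}
    (h : scanB grid i j pi pj rem seen = .push rem' x y) :
    pvCond grid i j x y pi pj = true ∧ (x, y) ∉ seen ∧ rem'.length < rem.length ∧
      ∀ f, goA grid f rem i j pi pj seen =
        match searchA grid f x y i j seen with
        | (true, s) => (true, s)
        | (false, s) => goA grid f rem' i j pi pj s := by
  induction rem with
  | nil => simp [scanB] at h
  | cons d rem0 ih =>
    rw [scanB] at h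
    by_cases hc : pvCond grid i j (i + d.1) (j + d.2) pi pj = true
    · simp only [hc, if_true] at h
      by_cases hm : (i + d.1, j + d.2) ∈ seen
      · simp [hm] at h
      · simp only [hm] at h
        obtain ⟨rfl, rfl, rfl⟩ : rem0 = rem' ∧ (i + d.1) = x ∧ (j + d.2) = y := by
          cases h; exact ⟨rfl, rfl, rfl⟩
        refine ⟨hc, hm, by simp, ?_⟩
        intro f
        rw [goA]
        simp [hc, hm]
    · simp only [hc] at h
      obtain ⟨h1, h2, h3, h4⟩ := ih h
      refine ⟨h1, h2, by simp; omega, ?_⟩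
      intro f
      rw [goA]
      simp only [hc]
      exact h4 f

lemma pv_runB_nil (grid : List (List String)) (f : Nat) (seen : PySem.Set (Int × Int)) :
    runB grid f [] seen = (false, seen) := by
  cases f <;> simp [runB]

lemma pv_runB_fuel (grid : List (List String)) :
    ∀ M fb fb' : Nat, M ≤ fb → M ≤ fb' → ∀ stack seen, pvM grid stack seen ≤ M →
      runB grid fb stack seen = runB grid fb' stack seen := by
  intro M
  induction M using Nat.strong_induction_on with
  | _ M IH =>
    intro fb fb' hfb hfb' stack seen hM
    match stack with
    | [] => rw [pv_runB_nil, pv_runB_nil]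
    | (i, j, pi, pj, rem) :: rest =>
      have hM1 : 1 ≤ pvM grid ((i, j, pi, pj, rem) :: rest) seen := by
        simp [pvM]; omega
      match M, fb, fb', hfb, hfb' with
      | mm + 1, fa + 1, fc + 1, hfb, hfc =>
        rw [runB, runB]
        rcases hscan : scanB grid i j pi pj rem seen with _ | ⟨rem', x, y⟩ | _
        · rfl
        · obtain ⟨hc, hm, hlen, _⟩ := pv_scan_push grid hscan
          have hcell := pv_cond_cells grid hc
          have hlt := pv_mu_add_lt grid hcell hm
          refine IH mm (Nat.lt_succ_self mm) fa fc (by omega) (by omega) _ _ ?_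
          have h1 : pvM grid ((x, y, i, j, pvDeltas) :: (i, j, pi, pj, rem') :: rest)
              (PySem.Set.add seen (x, y)) ≤ pvM grid ((i, j, pi, pj, rem) :: rest) seen - 2 := by
            simp only [pvM, List.map_cons, List.sum_cons, pvDeltas, List.length_cons,
              List.length_nil]
            omega
          omega
        · refine IH mm (Nat.lt_succ_self mm) fa fc (by omega) (by omega) rest seen ?_
          have : pvM grid rest seen ≤ pvM grid ((i, j, pi, pj, rem) :: rest) seen - 1 := by
            simp only [pvM, List.map_cons, List.sum_cons]; omega
          omega
      | 0, _, _, _, _ => omega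

-- the simulation: one frame of B's machine computes A's `search` loop
lemma pv_sim (grid : List (List String)) :
    ∀ m : Nat, ∀ seen, pvMu grid seen ≤ m → ∀ i j pi pj rem rest,
      runB grid (pvM grid ((i, j, pi, pj, rem) :: rest) seen) ((i, j, pi, pj, rem) :: rest) seen =
        match goA grid m rem i j pi pj seen with
        | (true, s) => (true, s)
        | (false, s) => runB grid (pvM grid rest s) rest s := by
  intro m
  induction m using Nat.strong_induction_on with
  | _ m IH =>
    intro seen hmu i j pi pj rem rest
    obtain ⟨K, hK⟩ : ∃ K, pvM grid ((i, j, pi, pj, rem) :: rest) seen = K + 1 := by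
      have : 1 ≤ pvM grid ((i, j, pi, pj, rem) :: rest) seen := by
        simp [pvM]; omega
      exact ⟨pvM grid ((i, j, pi, pj, rem) :: rest) seen - 1, by omega⟩
    rw [hK, runB]
    rcases hscan : scanB grid i j pi pj rem seen with _ | ⟨rem', x, y⟩ | _
    · dsimp only
      rw [pv_scan_cycle grid hscan m]
    · dsimp only
      obtain ⟨hc, hm, hlen, hgo⟩ := pv_scan_push grid hscan
      have hcell := pv_cond_cells grid hc
      have hlt := pv_mu_add_lt grid hcell hm
      have hpos : 0 < pvMu grid seen := Nat.lt_of_le_of_lt (Nat.zero_le _) hlt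
      match m, hmu with
      | 0, hmu => omega
      | mm + 1, hmu =>
        have hMle : pvM grid ((x, y, i, j, pvDeltas) :: (i, j, pi, pj, rem') :: rest)
            (PySem.Set.add seen (x, y)) ≤ K := by
          have h1 : pvM grid ((x, y, i, j, pvDeltas) :: (i, j, pi, pj, rem') :: rest)
              (PySem.Set.add seen (x, y)) ≤
              pvM grid ((i, j, pi, pj, rem) :: rest) seen - 2 := by
            simp only [pvM, List.map_cons, List.sum_cons, pvDeltas, List.length_cons,
              List.length_nil]
            omega
          omega
        rw [pv_runB_fuel grid (pvM grid ((x, y, i, j, pvDeltas) :: (i, j, pi, pj, rem') :: rest)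
              (PySem.Set.add seen (x, y))) K
            (pvM grid ((x, y, i, j, pvDeltas) :: (i, j, pi, pj, rem') :: rest)
              (PySem.Set.add seen (x, y))) hMle le_rfl _ _ le_rfl]
        rw [IH mm (Nat.lt_succ_self mm) (PySem.Set.add seen (x, y)) (by omega) x y i j
          pvDeltas ((i, j, pi, pj, rem') :: rest)]
        rw [hgo (mm + 1), searchA]
        rcases hres : goA grid mm pvDeltas x y i j (PySem.Set.add seen (x, y)) with ⟨b, s⟩
        cases b
        · have hsub : ∀ q, q ∈ seen → q ∈ s := by
            intro q hq
            have := pv_goA_mono grid mm pvDeltas x y i j (PySem.Set.add seen (x, y)) q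
              (by simp [PySem.Set.mem_add, hq])
            rwa [hres] at this
          have hμs : pvMu grid s ≤ mm := by
            have h2 : ∀ q, q ∈ PySem.Set.add seen (x, y) → q ∈ s := by
              intro q hq
              have := pv_goA_mono grid mm pvDeltas x y i j (PySem.Set.add seen (x, y)) q hq
              rwa [hres] at this
            exact le_trans (pv_mu_le grid h2) (by omega)
          dsimp only
          rw [IH mm (Nat.lt_succ_self mm) s hμs i j pi pj rem' rest]
          rw [← pv_goA_fuel grid mm mm (mm + 1) le_rfl (by omega) rem' s i j pi pj hμs]
        · dsimp only
    · dsimp only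
      rw [pv_scan_done grid hscan m]
      have hle : pvM grid rest seen ≤ K := by
        have : pvM grid rest seen ≤ pvM grid ((i, j, pi, pj, rem) :: rest) seen - 1 := by
          simp only [pvM, List.map_cons, List.sum_cons]; omega
        omega
      exact pv_runB_fuel grid (pvM grid rest seen) K (pvM grid rest seen) hle le_rfl rest
        seen le_rfl

lemma pv_inner_eq (grid : List (List String)) :
    ∀ js i seen, innerB grid i js seen = innerA grid i js seen := by
  intro js
  induction js with
  | nil => intro i seen; rw [innerA, innerB]
  | cons j js' ih =>
    intro i seen
    rw [innerA, innerB]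
    by_cases hm : (i, j) ∈ seen
    · simp only [hm, if_true, ih]
    · simp only [hm]
      have hmu : pvMu grid (PySem.Set.add seen (i, j)) ≤
          grid.length * ((PySem.List.pyGet? grid 0).getD []).length :=
        pv_mu_le_total grid _
      have hM : pvM grid [(i, j, -1, -1, pvDeltas)] (PySem.Set.add seen (i, j)) ≤
          pvFuelB grid := by
        simp only [pvM, pvDeltas, List.map_cons, List.map_nil, List.sum_cons, List.sum_nil,
          List.length_cons, List.length_nil, pvFuelB]
        omega
      rw [pv_runB_fuel grid (pvM grid [(i, j, -1, -1, pvDeltas)] (PySem.Set.add seen (i, j)))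
          (pvFuelB grid) (pvM grid [(i, j, -1, -1, pvDeltas)] (PySem.Set.add seen (i, j)))
          hM le_rfl _ _ le_rfl]
      rw [pv_sim grid (grid.length * ((PySem.List.pyGet? grid 0).getD []).length)
          (PySem.Set.add seen (i, j)) hmu i j (-1) (-1) pvDeltas []]
      have hA : pvFuelA grid =
          grid.length * ((PySem.List.pyGet? grid 0).getD []).length + 1 := rfl
      rw [hA, searchA]
      rcases hres : goA grid (grid.length * ((PySem.List.pyGet? grid 0).getD []).length)
          pvDeltas i j (-1) (-1) (PySem.Set.add seen (i, j)) with ⟨b, s⟩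
      cases b <;> simp [pv_runB_nil, ih]

lemma pv_outer_eq (grid : List (List String)) :
    ∀ is_ seen, outerB grid is_ seen = outerA grid is_ seen := by
  intro is_
  induction is_ with
  | nil => intro seen; rw [outerA, outerB]
  | cons i is' ih =>
    intro seen
    rw [outerA, outerB, pv_inner_eq]
    rcases innerA grid i (PySem.List.pyRange 0 (pvC grid) 1) seen with ⟨b, s⟩
    cases b
    · exact ih s
    · rfl

lemma pv_outerA_degenerate (grid : List (List String)) (h : pvC grid ≤ 0) :
    ∀ is_ seen, outerA grid is_ seen = false := by
  intro is_
  induction is_ with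
  | nil => intro seen; rw [outerA]
  | cons i is' ih =>
    intro seen
    rw [outerA, PySem.List.pyRange_one_eq_nil h, innerA]
    exact ih seen

-- ===== VERDICT (by name: the statement is the Claim_ definition above) =====
theorem doit_dfs_spec : Claim_equal_doit_dfs := by
  intro grid _ _
  unfold Spec_doit_dfs doit_dfs doit_dfs_alt
  by_cases h : grid.length = 0 ∨ pvC grid = 0
  · rw [if_pos h]
    rcases h with h | h
    · simp [outerA, pvR, h, PySem.List.pyRange_one_eq_nil]
    · exact pv_outerA_degenerate grid (by omega) _ _
  · rw [if_neg h, pv_outer_eq]
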